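-- pv_equiv track=rewrite | github.com/cfpb/regulations-xml-parser | regulation/changes.py | get_parent_label
-- ===== SOURCE A (Python) =====
-- def get_parent_label(label_parts):
--     """ Determine the parent label for the given label part list. """
--     parent_label = None
--
--     # It can't have a parent if it's only one part
--     if len(label_parts) <= 1:
--         return parent_label
--
--     # If it's the interps for the whole part, return the part
--     if len(label_parts) == 2:
--         return label_parts[:1]
--
--     # Not an interpretation label. This is easy.
--     parent_label = label_parts[0:-1]
--
--     if label_parts[-1] == 'Interp':
--         # It's the whole interp for the label. Get the parent and
--         # add Interp again.
--         parent_label = get_parent_label(parent_label)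
--         parent_label.append('Interp')
--
--     # Subparts are also special and their parent should be the label
--     # until the "Subpart" portion
--     if "Subpart" in label_parts:
--         parent_label = label_parts[:label_parts.index("Subpart")]
--
--     return parent_label
-- ===== SOURCE B (Python) =====
-- def get_parent_label(label_parts):
--     """Determine the parent label for the given label part list.
--
--     Iterative re-implementation: peel trailing 'Interp' tokens with a
--     counter instead of recursing, then build the result with one slice
--     plus a replicated suffix.
--     """
--     n = len(label_parts)
--     if n <= 1:
--         return None
--     if n == 2:
--         return label_parts[:1]
--     if 'Subpart' in label_parts:
--         return label_parts[:label_parts.index('Subpart')]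
--     k = 0
--     while k < n - 2 and label_parts[-1 - k] == 'Interp':
--         k += 1
--     return label_parts[:max(n - k - 1, 1)] + ['Interp'] * k
-- ===== Notes on version B (the rewrite author's own statement) =====
-- stated objective: alternative
-- what changed: Replaces A's self-recursion on label_parts[:-1] for trailing 'Interp' parts (and its post-hoc Subpart override) with guard-first checks, a counting while-loop over the trailing 'Interp' tokens, and a single slice plus a replicated 'Interp' suffix.
import Mathlib
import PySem

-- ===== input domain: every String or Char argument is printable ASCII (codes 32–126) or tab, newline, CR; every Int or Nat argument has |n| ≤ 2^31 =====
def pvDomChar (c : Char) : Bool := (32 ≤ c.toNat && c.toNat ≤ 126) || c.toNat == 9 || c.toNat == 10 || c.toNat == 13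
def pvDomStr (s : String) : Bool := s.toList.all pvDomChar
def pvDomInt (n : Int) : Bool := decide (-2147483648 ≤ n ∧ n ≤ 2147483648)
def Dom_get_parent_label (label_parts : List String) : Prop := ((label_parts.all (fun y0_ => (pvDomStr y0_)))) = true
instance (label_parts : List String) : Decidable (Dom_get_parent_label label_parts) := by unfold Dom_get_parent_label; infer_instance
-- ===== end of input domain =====

-- B replaces A's self-recursion over trailing 'Interp' tokens by a counting loop and
-- one slice-plus-replicate construction (objective: alternative decomposition, same cost).

-- needed by the port's decreasing_by (l[0:-1] is dropLast)
theorem slice_zero_neg_one {α : Type} (xs : List α) :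
    PySem.List.slice xs (some 0) (some (-1)) = xs.dropLast := by
  simp [PySem.List.slice, PySem.List.clampIdx]
  split
  · simp [*]
  · rw [List.dropLast_eq_take]; congr 1; omega

-- ===== PORT A =====
def get_parent_label (label_parts : List String) : Option (List String) :=
  -- It can't have a parent if it's only one part
  if _h1 : label_parts.length ≤ 1 then none
  -- If it's the interps for the whole part, return the part
  else if _h2 : label_parts.length = 2 then some (PySem.List.slice label_parts none (some 1))
  else
    -- parent_label = label_parts[0:-1]
    let parent := PySem.List.slice label_parts (some 0) (some (-1))
    let parent2 :=
      if PySem.List.pyGet? label_parts (-1) = some "Interp" then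
        -- recursion is on a list of length ≥ 2, so it returns a list; the `.getD []`
        -- default is unreachable (Python would raise AttributeError on None.append)
        ((get_parent_label parent).getD []) ++ ["Interp"]
      else parent
    if "Subpart" ∈ label_parts then
      match PySem.List.index? label_parts "Subpart" with
      | some i => some (PySem.List.slice label_parts none (some (i : Int)))
      | none => some parent2  -- unreachable: membership was just checked
    else some parent2
termination_by label_parts.length
decreasing_by rw [slice_zero_neg_one]; simp; omega

-- ===== PORT B =====
-- the while loop of Source B: count trailing 'Interp' entries, stopping before index 1
def bLoop (label_parts : List String) (k : Nat) : Nat :=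
  if k < label_parts.length - 2 ∧ PySem.List.pyGet? label_parts (-1 - (k : Int)) = some "Interp"
  then bLoop label_parts (k + 1)
  else k
termination_by label_parts.length - 2 - k

def get_parent_label_alt (label_parts : List String) : Option (List String) :=
  if label_parts.length ≤ 1 then none
  else if label_parts.length = 2 then some (PySem.List.slice label_parts none (some 1))
  else if "Subpart" ∈ label_parts then
    match PySem.List.index? label_parts "Subpart" with
    | some i => some (PySem.List.slice label_parts none (some (i : Int)))
    | none => none  -- unreachable: membership was just checked
  else
    some (PySem.List.slice label_parts none
            (some (max ((label_parts.length : Int) - (bLoop label_parts 0) - 1) 1))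
          ++ List.replicate (bLoop label_parts 0) "Interp")

-- ===== PRECONDITION & SPEC =====
def Spec_get_parent_label (label_parts : List String) (out : Option (List String)) : Prop := out = get_parent_label_alt label_parts
instance (label_parts : List String) (out : Option (List String)) : Decidable (Spec_get_parent_label label_parts out) := by unfold Spec_get_parent_label; infer_instance

-- ===== CLAIM (what is proved, stated in full; the proofs are below) =====
def Claim_equal_get_parent_label : Prop := ∀ (label_parts : List String), Dom_get_parent_label label_parts → Spec_get_parent_label label_parts (get_parent_label label_parts)

-- ===== LEMMAS AND PROOFS =====

theorem pyGet?_dropLast_shift (l : List String) (k : Nat) :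
    PySem.List.pyGet? l (-2 - k) = PySem.List.pyGet? l.dropLast (-1 - k) := by
  simp only [PySem.List.pyGet?, PySem.List.pyIdx?, List.length_dropLast]
  split_ifs <;> simp_all <;> try omega
  · rw [List.getElem?_dropLast]
    have he : l.length - ((k:Int) + 2).toNat = l.length - 1 - (k + 1) := by omega
    rw [he]
    split_ifs with h
    · rfl
    · omega

theorem bLoop_shift (l : List String) (m : Nat) :
    ∀ k, l.length - 2 - k ≤ m → bLoop l (k + 1) = bLoop l.dropLast k + 1 := by
  induction m with
  | zero =>
    intro k hk
    conv_lhs => rw [bLoop]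
    conv_rhs => rw [bLoop]
    have h1 : ¬ (k + 1 < l.length - 2) := by omega
    have h2 : ¬ (k < l.dropLast.length - 2) := by simp; omega
    rw [if_neg (fun h => h1 h.1), if_neg (fun h => h2 h.1)]
  | succ m ih =>
    intro k hk
    have hcast : (((k + 1 : Nat)) : Int) = (k : Int) + 1 := by push_cast; ring
    have hget : PySem.List.pyGet? l (-1 - ((k + 1 : Nat) : Int)) = PySem.List.pyGet? l.dropLast (-1 - k) := by
      rw [hcast, show (-1 - ((k:Int) + 1)) = -2 - k by ring, pyGet?_dropLast_shift]
    conv_lhs => rw [bLoop]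
    conv_rhs => rw [bLoop]
    by_cases hc : k < l.dropLast.length - 2 ∧ PySem.List.pyGet? l.dropLast (-1 - (k:Int)) = some "Interp"
    · have hlen : k < l.length - 1 - 2 := by simpa using hc.1
      have hc' : k + 1 < l.length - 2 ∧ PySem.List.pyGet? l (-1 - ((k + 1 : Nat) : Int)) = some "Interp" :=
        ⟨by omega, by rw [hget]; exact hc.2⟩
      rw [if_pos hc, if_pos hc']
      exact ih (k + 1) (by omega)
    · have hc' : ¬ (k + 1 < l.length - 2 ∧ PySem.List.pyGet? l (-1 - ((k + 1 : Nat) : Int)) = some "Interp") := by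
        intro ⟨ha, hb⟩
        exact hc ⟨by simp; omega, by rw [← hget]; exact hb⟩
      rw [if_neg hc, if_neg hc']

-- take m of l and of l.dropLast agree for m ≤ l.length - 1
theorem take_dropLast_eq (l : List String) (m : Nat) (hm : m ≤ l.length - 1) :
    l.dropLast.take m = l.take m := by
  rw [List.dropLast_eq_take, List.take_take]
  congr 1
  omega

theorem bLoop_zero_of_stop (l : List String)
    (h : ¬ (0 < l.length - 2 ∧ PySem.List.pyGet? l (-1) = some "Interp")) : bLoop l 0 = 0 := by
  rw [bLoop, if_neg]
  intro ⟨ha, hb⟩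
  exact h ⟨ha, by simpa using hb⟩

-- B's list-building step commutes with peeling one trailing 'Interp'
theorem alt_step (l : List String) (h3 : 3 ≤ l.length) (hsub : "Subpart" ∉ l)
    (hlast : PySem.List.pyGet? l (-1) = some "Interp") :
    get_parent_label_alt l = some ((get_parent_label_alt l.dropLast).getD [] ++ ["Interp"]) := by
  have h1 : ¬ l.length ≤ 1 := by omega
  have h2 : l.length ≠ 2 := by omega
  have hK : bLoop l 0 = bLoop l.dropLast 0 + 1 := by
    rw [bLoop, if_pos ⟨by omega, by simpa using hlast⟩]
    exact bLoop_shift l l.length 0 (by omega)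
  set K := bLoop l.dropLast 0 with hKdef
  conv_lhs => rw [get_parent_label_alt]
  rw [if_neg h1, if_neg h2, if_neg hsub, hK]
  have hmaxpos : (0:Int) ≤ max ((l.length : Int) - ((K + 1 : Nat) : Int) - 1) 1 := by
    have := le_max_right ((l.length : Int) - ((K + 1 : Nat) : Int) - 1) 1; omega
  simp only [PySem.List.slice_to l hmaxpos]
  by_cases hl3 : l.length = 3
  · -- dropLast has length 2
    have hd1 : ¬ l.dropLast.length ≤ 1 := by simp; omega
    have hd2 : l.dropLast.length = 2 := by simp; omega
    have hK0 : K = 0 := by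
      rw [hKdef]
      apply bLoop_zero_of_stop
      intro ⟨ha, _⟩; simp at ha; omega
    conv_rhs => rw [get_parent_label_alt]
    rw [if_neg hd1, if_pos hd2]
    simp only [PySem.List.slice_to l.dropLast (by norm_num : (0:Int) ≤ 1)]
    rw [hK0]
    have hm : (max ((l.length : Int) - ((0 + 1 : Nat) : Int) - 1) 1).toNat = 1 := by
      push_cast; omega
    rw [hm, ← take_dropLast_eq l 1 (by omega)]
    simp
  · -- dropLast has length ≥ 3
    have hd1 : ¬ l.dropLast.length ≤ 1 := by simp; omega
    have hd2 : l.dropLast.length ≠ 2 := by simp; omega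
    have hdsub : "Subpart" ∉ l.dropLast := fun h => hsub (List.mem_of_mem_dropLast h)
    conv_rhs => rw [get_parent_label_alt]
    rw [if_neg hd1, if_neg hd2, if_neg hdsub, ← hKdef]
    have hmaxpos' : (0:Int) ≤ max ((l.dropLast.length : Int) - K - 1) 1 := by
      have := le_max_right ((l.dropLast.length : Int) - (K:Int) - 1) 1; omega
    simp only [PySem.List.slice_to l.dropLast hmaxpos']
    simp only [Option.getD_some]
    have hmeq : (max ((l.length : Int) - ((K + 1 : Nat) : Int) - 1) 1).toNat
        = (max ((l.dropLast.length : Int) - (K:Int) - 1) 1).toNat := by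
      simp only [List.length_dropLast]; push_cast; omega
    have hmle : (max ((l.dropLast.length : Int) - (K:Int) - 1) 1).toNat ≤ l.length - 1 := by
      simp only [List.length_dropLast]; omega
    rw [hmeq, take_dropLast_eq l _ hmle, List.replicate_succ']
    simp [List.append_assoc]

-- B returns the whole prefix when the last part is not 'Interp'
theorem alt_plain (l : List String) (h3 : 3 ≤ l.length) (hsub : "Subpart" ∉ l)
    (hlast : PySem.List.pyGet? l (-1) ≠ some "Interp") :
    get_parent_label_alt l = some l.dropLast := by
  have h1 : ¬ l.length ≤ 1 := by omega
  have h2 : l.length ≠ 2 := by omega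
  have hK0 : bLoop l 0 = 0 := bLoop_zero_of_stop l (fun ⟨_, hb⟩ => hlast hb)
  rw [get_parent_label_alt]
  rw [if_neg h1, if_neg h2, if_neg hsub, hK0]
  have hmaxpos : (0:Int) ≤ max ((l.length : Int) - ((0:Nat):Int) - 1) 1 := by
    have := le_max_right ((l.length : Int) - ((0:Nat):Int) - 1) 1; omega
  simp only [PySem.List.slice_to l hmaxpos]
  have hm : (max ((l.length : Int) - ((0:Nat):Int) - 1) 1).toNat = l.length - 1 := by
    push_cast; omega
  rw [hm, ← List.dropLast_eq_take]
  simp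

theorem main_aux (n : Nat) : ∀ (l : List String), l.length ≤ n →
    get_parent_label l = get_parent_label_alt l := by
  induction n with
  | zero =>
    intro l hl
    have h1 : l.length ≤ 1 := by omega
    rw [get_parent_label.eq_def, get_parent_label_alt]
    simp [h1]
  | succ n ih =>
    intro l hl
    rw [get_parent_label.eq_def]
    by_cases h1 : l.length ≤ 1
    · rw [get_parent_label_alt]; simp [h1]
    by_cases h2 : l.length = 2
    · rw [get_parent_label_alt]; simp [h2]
    rw [dif_neg h1, dif_neg h2]
    have h3 : 3 ≤ l.length := by omega
    by_cases hsub : "Subpart" ∈ l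
    · -- Subpart branch: both return the prefix up to the first 'Subpart'
      obtain ⟨i, hi⟩ := Option.isSome_iff_exists.mp ((PySem.List.index?_isSome_iff l "Subpart").mpr hsub)
      simp only [if_pos hsub, hi]
      rw [get_parent_label_alt]
      rw [if_neg h1, if_neg h2, if_pos hsub, hi]
    · simp only [if_neg hsub, slice_zero_neg_one]
      by_cases hlast : PySem.List.pyGet? l (-1) = some "Interp"
      · rw [if_pos hlast, ih l.dropLast (by simp; omega),
            alt_step l h3 hsub hlast]
      · rw [if_neg hlast, alt_plain l h3 hsub hlast]

-- ===== VERDICT (by name: the statement is the Claim_ definition above) =====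
theorem get_parent_label_spec : Claim_equal_get_parent_label := by
  intro l _
  unfold Spec_get_parent_label
  exact main_aux l.length l le_rfl
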